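-- pv_equiv track=rewrite | github.com/rsbohn/dusky-petrel | scripts/create_game_tape.py | string_to_words
-- ===== SOURCE A (Python) =====
-- def string_to_words(text):
--     """Convert ASCII string to 16-bit words (Nova format: high byte first, low byte second)."""
--     # Pad to even length
--     if len(text) % 2 == 1:
--         text += '\0'
--
--     words = []
--     for i in range(0, len(text), 2):
--         # First char goes in high byte, second char in low byte
--         word = (ord(text[i]) << 8) | ord(text[i + 1])
--         words.append(word)
--
--     # Add terminating zero if not already present
--     if not words or words[-1] != 0:
--         words.append(0)
--
--     return words
-- ===== SOURCE B (Python) =====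
-- def string_to_words(text):
--     """Convert ASCII string to 16-bit words (Nova format: high byte first, low byte second)."""
--     words = []
--     pending = None
--     for c in text:
--         if pending is None:
--             pending = ord(c)
--         else:
--             words.append((pending << 8) | ord(c))
--             pending = None
--     if pending is not None:
--         words.append((pending << 8) | 0)
--     if not words or words[-1] != 0:
--         words.append(0)
--     return words
-- ===== Notes on version B (the rewrite author's own statement) =====
-- stated objective: simpler
-- what changed: B replaces A's pad-to-even-then-index-pairs range loop with a single pass over the characters carrying a pending high byte in an accumulator, with no padding and no indexing.
import Mathlib
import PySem

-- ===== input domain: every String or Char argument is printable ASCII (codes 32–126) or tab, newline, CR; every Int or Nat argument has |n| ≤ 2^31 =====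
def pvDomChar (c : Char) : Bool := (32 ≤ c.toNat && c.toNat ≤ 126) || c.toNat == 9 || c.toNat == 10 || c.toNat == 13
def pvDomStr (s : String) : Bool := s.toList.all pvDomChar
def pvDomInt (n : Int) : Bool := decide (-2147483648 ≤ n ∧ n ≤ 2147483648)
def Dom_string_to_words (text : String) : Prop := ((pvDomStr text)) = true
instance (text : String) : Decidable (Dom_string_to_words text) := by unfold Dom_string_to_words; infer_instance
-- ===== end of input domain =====

-- B replaces A's pad-then-index-pairs loop with a single pass over the characters
-- keeping a pending high byte (objective: simpler, one traversal without padding/indexing).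

-- ===== PORT A =====
-- A: pad to even length, then loop i = 0,2,4,… indexing text[i], text[i+1].
def string_to_words (text : String) : List Int :=
  let cs0 := text.toList
  let cs := if cs0.length % 2 == 1 then cs0 ++ ['\x00'] else cs0
  let words := (PySem.List.pyRange 0 (cs.length : Int) 2).foldl
    (fun (words : List Int) (i : Int) =>
      words ++ [((((PySem.List.pyGetD cs i '\x00').toNat <<< 8) |||
                (PySem.List.pyGetD cs (i + 1) '\x00').toNat : Nat) : Int)]) []
  if words = [] ∨ words.getLast? ≠ some 0 then words ++ [0] else words

-- ===== PORT B =====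
-- B: one pass, pending high byte carried in an Option.
def string_to_words_alt (text : String) : List Int :=
  let st := text.toList.foldl
    (fun (st : List Int × Option Nat) c =>
      match st.2 with
      | none => (st.1, some c.toNat)
      | some p => (st.1 ++ [(((p <<< 8) ||| c.toNat : Nat) : Int)], none)) ([], none)
  let words := match st.2 with
    | some p => st.1 ++ [(((p <<< 8) ||| 0 : Nat) : Int)]
    | none => st.1
  if words = [] ∨ words.getLast? ≠ some 0 then words ++ [0] else words

-- ===== PRECONDITION & SPEC =====
def Spec_string_to_words (text : String) (out : List Int) : Prop := out = string_to_words_alt text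
instance (text : String) (out : List Int) : Decidable (Spec_string_to_words text out) := by unfold Spec_string_to_words; infer_instance

-- ===== CLAIM (what is proved, stated in full; the proofs are below) =====
def Claim_equal_string_to_words : Prop := ∀ (text : String), Dom_string_to_words text → Spec_string_to_words text (string_to_words text)

-- ===== LEMMAS AND PROOFS =====

-- the word list both loops build (high byte <<8, or low byte; odd tail gets low byte 0)
def pairW : List Char → List Int
  | [] => []
  | [c] => [(((c.toNat <<< 8) ||| 0 : Nat) : Int)]
  | a :: b :: t => ((((a.toNat <<< 8) ||| b.toNat : Nat)) : Int) :: pairW t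

-- padding with NUL on odd length does not change the word list
theorem pairW_pad (cs : List Char) (h : cs.length % 2 = 1) :
    pairW (cs ++ ['\x00']) = pairW cs := by
  induction cs using pairW.induct with
  | case1 => simp at h
  | case2 c => simp [pairW]
  | case3 a b t ih =>
    simp only [List.cons_append, pairW]
    rw [ih (by simp [List.length_cons] at h; omega)]

theorem getD_cons2 {α : Type} (x y : α) (t : List α) (k : Nat) (d : α) :
    (x :: y :: t).getD (k + 2) d = t.getD k d := by
  show (x :: y :: t).getD (k + 1 + 1) d = t.getD k d
  rw [List.getD_cons_succ, List.getD_cons_succ]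

-- A's indexed word at an even base, as List.getD
def wA (cs : List Char) (k : Nat) : Int :=
  (((cs.getD (2 * k) '\x00').toNat <<< 8) ||| (cs.getD (2 * k + 1) '\x00').toNat : Nat)

theorem mapA (cs : List Char) (h : cs.length % 2 = 0) :
    (List.range (cs.length / 2)).map (wA cs) = pairW cs := by
  induction cs using pairW.induct with
  | case1 => simp [pairW]
  | case2 c => simp at h
  | case3 a b t ih =>
    have hlen : (a :: b :: t).length / 2 = t.length / 2 + 1 := by
      simp [List.length_cons]; omega
    rw [hlen, List.range_succ_eq_map, List.map_cons, List.map_map]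
    have h0 : wA (a :: b :: t) 0 = (((a.toNat <<< 8) ||| b.toNat : Nat) : Int) := by
      simp [wA]
    have hs : (wA (a :: b :: t) ∘ Nat.succ) = wA t := by
      funext k
      simp only [Function.comp, wA, Nat.succ_eq_add_one]
      have e1 : 2 * (k + 1) = 2 * k + 2 := by ring
      have e2 : 2 * k + 2 + 1 = (2 * k + 1) + 2 := by ring
      rw [e1, e2, getD_cons2, getD_cons2]
    rw [h0, hs, ih (by simp [List.length_cons] at h; omega)]
    rfl

-- B's fold with pending high byte, finished, yields the word list
theorem foldB (cs : List Char) (ws : List Int) :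
    (match (cs.foldl
      (fun (st : List Int × Option Nat) c =>
        match st.2 with
        | none => (st.1, some c.toNat)
        | some p => (st.1 ++ [(((p <<< 8) ||| c.toNat : Nat) : Int)], none)) (ws, none)).2 with
      | some p => (cs.foldl
        (fun (st : List Int × Option Nat) c =>
          match st.2 with
          | none => (st.1, some c.toNat)
          | some p => (st.1 ++ [(((p <<< 8) ||| c.toNat : Nat) : Int)], none)) (ws, none)).1
          ++ [(((p <<< 8) ||| 0 : Nat) : Int)]
      | none => (cs.foldl
        (fun (st : List Int × Option Nat) c =>
          match st.2 with
          | none => (st.1, some c.toNat)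
          | some p => (st.1 ++ [(((p <<< 8) ||| c.toNat : Nat) : Int)], none)) (ws, none)).1)
    = ws ++ pairW cs := by
  induction cs using pairW.induct generalizing ws with
  | case1 => simp [pairW]
  | case2 c => simp [pairW]
  | case3 a b t ih => simpa [pairW] using ih (ws ++ [(((a.toNat <<< 8) ||| b.toNat : Nat) : Int)])

-- A's loop over range(0, len, 2) equals the word list, for even length
theorem loopA (cs : List Char) (h : cs.length % 2 = 0) :
    (PySem.List.pyRange 0 (cs.length : Int) 2).foldl
      (fun (words : List Int) (i : Int) =>
        words ++ [((((PySem.List.pyGetD cs i '\x00').toNat <<< 8) |||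
                  (PySem.List.pyGetD cs (i + 1) '\x00').toNat : Nat) : Int)]) []
    = pairW cs := by
  rw [PySem.List.foldl_append_singleton_eq_map
    (fun i => ((((PySem.List.pyGetD cs i '\x00').toNat <<< 8) |||
                  (PySem.List.pyGetD cs (i + 1) '\x00').toNat : Nat) : Int))]
  rw [PySem.List.pyRange_of_pos 0 (cs.length : Int) (by norm_num), List.map_map]
  rw [← mapA cs h]
  rcases Nat.even_iff.mpr h with ⟨n, hn⟩
  have hn2 : cs.length = 2 * n := by omega
  rw [hn2]
  rcases Nat.eq_zero_or_pos n with h0 | hpos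
  · simp [h0]
  · have hif : ((0:Int) < ((2 * n : Nat) : Int)) := by push_cast; positivity
    rw [if_pos hif]
    have hcount : ((((2 * n : Nat) : Int) - 0 + 2 - 1) / 2).toNat = n := by push_cast; omega
    rw [hcount, show 2 * n / 2 = n from by omega]
    apply List.map_congr_left
    intro k hk
    simp only [Function.comp, wA]
    rw [show (0 : Int) + 2 * (k : Int) = ((2 * k : Nat) : Int) by push_cast; ring]
    rw [show ((2 * k : Nat) : Int) + 1 = ((2 * k + 1 : Nat) : Int) by push_cast; ring]
    rw [PySem.List.pyGetD_of_nonneg _ _ (by positivity), PySem.List.pyGetD_of_nonneg _ _ (by positivity)]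
    simp only [List.getD_eq_getElem?_getD, Int.toNat_natCast]

-- the two bodies agree, stated over the character list
theorem bodies (cs : List Char) :
    (let csp := if cs.length % 2 == 1 then cs ++ ['\x00'] else cs
     let words := (PySem.List.pyRange 0 (csp.length : Int) 2).foldl
       (fun (words : List Int) (i : Int) =>
         words ++ [((((PySem.List.pyGetD csp i '\x00').toNat <<< 8) |||
                   (PySem.List.pyGetD csp (i + 1) '\x00').toNat : Nat) : Int)]) []
     if words = [] ∨ words.getLast? ≠ some 0 then words ++ [0] else words)
    =
    (let st := cs.foldl
       (fun (st : List Int × Option Nat) c =>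
         match st.2 with
         | none => (st.1, some c.toNat)
         | some p => (st.1 ++ [(((p <<< 8) ||| c.toNat : Nat) : Int)], none)) ([], none)
     let words := match st.2 with
       | some p => st.1 ++ [(((p <<< 8) ||| 0 : Nat) : Int)]
       | none => st.1
     if words = [] ∨ words.getLast? ≠ some 0 then words ++ [0] else words) := by
  simp only []
  have heven : (if cs.length % 2 == 1 then cs ++ ['\x00'] else cs).length % 2 = 0 := by
    by_cases h : cs.length % 2 = 1
    · simp [h]; omega
    · simp only [beq_iff_eq, h, if_false]; omega
  have hpad : pairW (if cs.length % 2 == 1 then cs ++ ['\x00'] else cs) = pairW cs := by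
    by_cases h : cs.length % 2 = 1
    · simp only [beq_iff_eq, h, if_true]
      exact pairW_pad cs h
    · simp [h]
  have hB := foldB cs []
  simp only [List.nil_append] at hB
  rw [loopA _ heven, hpad, hB]

-- ===== VERDICT (by name: the statement is the Claim_ definition above) =====
theorem string_to_words_spec : Claim_equal_string_to_words := by
  intro text _
  unfold Spec_string_to_words string_to_words string_to_words_alt
  exact bodies text.toList
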